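-- pv_equiv track=rewrite | github.com/pypi-data/pypi-mirror-343 | packages/smol-format/smol_format-0.1.2.tar.gz/smol_format-0.1.2/examples/scientific_data.py | generate_fibonacci_ratios
-- ===== SOURCE A (Python) =====
-- from typing import Dict, List, Union
--
-- def generate_fibonacci_ratios(n: int) -> List[str]:
--     """Generate ratios of consecutive Fibonacci numbers."""
--     def fib(n: int) -> int:
--         if n <= 1:
--             return n
--         a, b = 0, 1
--         for _ in range(n - 1):
--             a, b = b, a + b
--         return b
--
--     ratios = []
--     for i in range(2, n + 2):
--         fn = fib(i)
--         fn_minus_1 = fib(i - 1)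
--         ratio = f"{fn}/{fn_minus_1}"
--         ratios.append(ratio)
--
--     return ratios
-- ===== SOURCE B (Python) =====
-- def generate_fibonacci_ratios(n: int):
--     """Generate ratios of consecutive Fibonacci numbers (single pass)."""
--     ratios = []
--     a, b = 1, 1  # fib(1), fib(2)
--     for _ in range(max(n, 0)):
--         ratios.append(f"{b}/{a}")
--         a, b = b, a + b
--     return ratios
-- ===== Notes on version B (the rewrite author's own statement) =====
-- stated objective: faster
-- what changed: B maintains the previous two Fibonacci numbers incrementally in one pass instead of recomputing fib(i) and fib(i-1) from scratch on every iteration.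
import Mathlib
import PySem

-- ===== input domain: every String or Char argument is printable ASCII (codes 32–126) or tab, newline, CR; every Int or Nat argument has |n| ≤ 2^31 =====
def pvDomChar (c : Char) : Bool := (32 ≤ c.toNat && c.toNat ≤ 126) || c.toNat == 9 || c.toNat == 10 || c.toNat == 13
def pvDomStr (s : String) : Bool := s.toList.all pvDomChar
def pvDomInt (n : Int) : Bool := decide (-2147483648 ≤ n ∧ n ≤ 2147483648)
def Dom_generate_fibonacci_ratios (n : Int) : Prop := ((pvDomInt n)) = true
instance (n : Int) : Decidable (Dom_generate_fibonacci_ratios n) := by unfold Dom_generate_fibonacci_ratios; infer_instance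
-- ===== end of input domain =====

-- B recomputes nothing: one pass, carrying the previous two Fibonacci numbers; A recomputes fib from scratch each iteration.

-- ===== PORT A =====
-- inner helper fib of A, transliterated: 'if n <= 1: return n' then a,b loop over range(n-1)
def pvFibA (n : Int) : Int :=
  if n ≤ 1 then n
  else ((PySem.List.pyRange 0 (n - 1) 1).foldl (fun (p : Int × Int) _ => (p.2, p.1 + p.2)) (0, 1)).2

def generate_fibonacci_ratios (n : Int) : List String :=
  (PySem.List.pyRange 2 (n + 2) 1).foldl
    (fun acc i => acc ++ [PySem.Int.toStr (pvFibA i) ++ "/" ++ PySem.Int.toStr (pvFibA (i - 1))]) []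

-- ===== PORT B =====
-- B's loop: k remaining iterations, (a, b) = previous two Fibonacci numbers
def pvAltLoop : Nat → Int → Int → List String
  | 0, _, _ => []
  | k + 1, a, b => (PySem.Int.toStr b ++ "/" ++ PySem.Int.toStr a) :: pvAltLoop k b (a + b)

def generate_fibonacci_ratios_alt (n : Int) : List String :=
  pvAltLoop (max n 0).toNat 1 1

-- ===== PRECONDITION & SPEC =====
def Spec_generate_fibonacci_ratios (n : Int) (out : List String) : Prop := out = generate_fibonacci_ratios_alt n
instance (n : Int) (out : List String) : Decidable (Spec_generate_fibonacci_ratios n out) := by unfold Spec_generate_fibonacci_ratios; infer_instance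

-- ===== CLAIM (what is proved, stated in full; the proofs are below) =====
def Claim_equal_generate_fibonacci_ratios : Prop := ∀ (n : Int), Dom_generate_fibonacci_ratios n → Spec_generate_fibonacci_ratios n (generate_fibonacci_ratios n)

-- ===== LEMMAS AND PROOFS =====

-- the mathematical Fibonacci sequence, the common reference of both ports
def pvF : Nat → Int
  | 0 => 0
  | 1 => 1
  | k + 2 => pvF k + pvF (k + 1)

-- A's inner fold only uses the list's length
def pvPairIter : Nat → Int × Int → Int × Int
  | 0, p => p
  | k + 1, p => pvPairIter k (p.2, p.1 + p.2)

theorem pvFoldl_const_pair {α : Type} (l : List α) (p : Int × Int) :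
    l.foldl (fun (q : Int × Int) _ => (q.2, q.1 + q.2)) p = pvPairIter l.length p := by
  induction l generalizing p with
  | nil => rfl
  | cons x xs ih => simp [pvPairIter, ih]

theorem pvPairIter_fib (m j : Nat) :
    pvPairIter m (pvF j, pvF (j + 1)) = (pvF (j + m), pvF (j + m + 1)) := by
  induction m generalizing j with
  | zero => simp [pvPairIter]
  | succ k ih =>
    have h2 : pvF j + pvF (j + 1) = pvF (j + 2) := rfl
    simp only [pvPairIter, h2]
    have := ih (j + 1)
    rw [show j + 1 + 1 = j + 2 from rfl] at this
    rw [this]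
    rw [show j + 1 + k = j + (k + 1) from by omega]

theorem pvFibA_eq (k : Nat) : pvFibA (k : Int) = pvF k := by
  match k with
  | 0 => rfl
  | 1 => rfl
  | k + 2 =>
    unfold pvFibA
    rw [if_neg (by push_cast; omega)]
    rw [PySem.List.pyRange_one, List.foldl_map, pvFoldl_const_pair]
    have hc : ((k + 2 : Nat) : Int) - 1 - 0 = ((k + 1 : Nat) : Int) := by push_cast; ring
    rw [hc, Int.toNat_natCast, List.length_range]
    have := pvPairIter_fib (k + 1) 0
    simp only [Nat.zero_add] at this
    show (pvPairIter (k + 1) (pvF 0, pvF 1)).2 = pvF (k + 2)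
    rw [this]

-- foldl that appends singletons is a map
theorem pvFoldl_append_map {α : Type} (g : α → String) (l : List α) (init : List String) :
    l.foldl (fun acc i => acc ++ [g i]) init = init ++ l.map g := by
  induction l generalizing init with
  | nil => simp
  | cons x xs ih => simp [ih]

-- B's loop, run from (fib(j+1), fib(j+2)), in closed form
theorem pvAltLoop_eq (m j : Nat) :
    pvAltLoop m (pvF (j + 1)) (pvF (j + 2)) =
      (List.range m).map (fun t => PySem.Int.toStr (pvF (j + 2 + t)) ++ "/" ++ PySem.Int.toStr (pvF (j + 1 + t))) := by
  induction m generalizing j with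
  | zero => rfl
  | succ k ih =>
    rw [List.range_succ_eq_map]
    simp only [List.map_cons, List.map_map]
    have hstep : pvF (j + 1) + pvF (j + 2) = pvF (j + 3) := rfl
    simp only [pvAltLoop, hstep]
    have h2 : pvF (j + 2) = pvF ((j + 1) + 1) := rfl
    have h3 : pvF (j + 3) = pvF ((j + 1) + 2) := rfl
    rw [h2, h3, ih (j + 1)]
    simp only [Nat.add_zero]
    refine congrArg₂ _ rfl ?_
    refine List.map_congr_left fun t _ => ?_
    simp only [Function.comp_apply]
    rw [show j + 1 + 2 + t = j + 2 + (t + 1) from by omega,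
        show j + 1 + 1 + t = j + 1 + (t + 1) from by omega]

theorem generate_fibonacci_ratios_spec : Claim_equal_generate_fibonacci_ratios := by
  intro n _
  show generate_fibonacci_ratios n = generate_fibonacci_ratios_alt n
  unfold generate_fibonacci_ratios generate_fibonacci_ratios_alt
  rw [PySem.List.pyRange_one, pvFoldl_append_map, List.nil_append, List.map_map]
  have hm : (max n 0).toNat = (n + 2 - 2).toNat := by omega
  rw [hm]
  have halt := pvAltLoop_eq ((n + 2 - 2).toNat) 0
  simp only [Nat.zero_add] at halt
  have h12 : pvAltLoop (n + 2 - 2).toNat 1 1 = pvAltLoop (n + 2 - 2).toNat (pvF 1) (pvF 2) := rfl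
  rw [h12, halt]
  refine List.map_congr_left fun k _ => ?_
  simp only [Function.comp_apply]
  have e1 : (2 : Int) + (k : Int) = ((2 + k : Nat) : Int) := by push_cast; ring
  have e2 : (2 : Int) + (k : Int) - 1 = ((1 + k : Nat) : Int) := by push_cast; ring
  rw [e1]
  rw [show ((2 + k : Nat) : Int) - 1 = ((1 + k : Nat) : Int) by push_cast; ring]
  rw [pvFibA_eq, pvFibA_eq]
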